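-- pv_equiv track=rewrite | github.com/SebaCaste/adventOfCode | 5/main.py | create_rules
-- ===== SOURCE A (Python) =====
-- def create_rules(s: str) -> int:
--     a = s.split('\n')
--     second_part=[]
--     check=1
--     rules={}
--     for i in a:
--         if check:
--             if i =="":
--                 check=0
--             else:
--                 if i[0:2] not in rules:
--                     rules[i[0:2]]=[]
--                 rules[i[0:2]].append(i[3:5])
--         else:
--             second_part.append(i)
--     return rules,second_part
-- ===== SOURCE B (Python) =====
-- def create_rules(s: str):
--     lines = s.split('\n')
--     try:
--         idx = lines.index('')
--     except ValueError:
--         idx = len(lines)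
--     head = lines[:idx]
--     second_part = lines[idx + 1:]
--     keys = list(dict.fromkeys(l[0:2] for l in head))
--     rules = {k: [l[3:5] for l in head if l[0:2] == k] for k in keys}
--     return rules, second_part
-- ===== Notes on version B (the rewrite author's own statement) =====
-- stated objective: simpler
-- what changed: B replaces A's stateful flag-driven single pass with a decomposition: locate the first empty line, slice the list into rules/second-part sections, and build the rules dict by grouping (ordered distinct keys, each paired with a comprehension over the head); no mutable flag or in-place list mutation.
import Mathlib
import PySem

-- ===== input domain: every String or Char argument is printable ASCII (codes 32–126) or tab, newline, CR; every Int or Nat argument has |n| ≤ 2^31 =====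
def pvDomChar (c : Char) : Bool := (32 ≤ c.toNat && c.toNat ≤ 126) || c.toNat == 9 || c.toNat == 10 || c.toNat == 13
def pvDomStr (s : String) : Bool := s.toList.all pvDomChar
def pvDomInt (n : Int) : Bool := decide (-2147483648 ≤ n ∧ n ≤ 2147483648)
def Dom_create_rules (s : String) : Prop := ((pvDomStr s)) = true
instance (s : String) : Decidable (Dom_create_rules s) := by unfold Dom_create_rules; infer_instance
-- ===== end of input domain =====

-- B splits the input at the first empty line and groups rules by ordered distinct keys;
-- A keeps a mutable flag and a dict mutated in place. Equivalence is about the return value.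

-- ===== PORT A =====
-- s.split('\n')  (sep is a nonempty literal, so split? never returns none)
def pvLines (s : String) : List String := (PySem.Str.split? s "\n").getD []

-- one iteration of A's loop over state (check, rules, second_part)
def pvStepA (st : Bool × PySem.Dict String (List String) × List String) (i : String) :
    Bool × PySem.Dict String (List String) × List String :=
  let (check, rules, second) := st
  if check then
    if i == "" then (false, rules, second)
    else
      let k := PySem.Str.slice i (some 0) (some 2)
      let rules := if rules.contains k then rules else rules.insert k []
      (check, rules.modify k [] (· ++ [PySem.Str.slice i (some 3) (some 5)]), second)
  else (check, rules, second ++ [i])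

def create_rules (s : String) : (List (String × List String)) × List String :=
  let a := pvLines s
  let st := a.foldl pvStepA (true, PySem.Dict.empty, [])
  (st.2.1.items, st.2.2)

-- ===== PORT B =====
def create_rules_alt (s : String) : (List (String × List String)) × List String :=
  let lines := pvLines s
  let idx := (PySem.List.index? lines "").getD lines.length
  let head := lines.take idx
  let second_part := lines.drop (idx + 1)
  let keys := PySem.List.dedup (head.map (fun l => PySem.Str.slice l (some 0) (some 2)))
  (keys.map (fun k =>
      (k, (head.filter (fun l => PySem.Str.slice l (some 0) (some 2) == k)).map
            (fun l => PySem.Str.slice l (some 3) (some 5)))),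
   second_part)

-- ===== PRECONDITION & SPEC =====
def Spec_create_rules (s : String) (out : (List (String × List String)) × List String) : Prop := out = create_rules_alt s
instance (s : String) (out : (List (String × List String)) × List String) : Decidable (Spec_create_rules s out) := by unfold Spec_create_rules; infer_instance

-- ===== CLAIM (what is proved, stated in full; the proofs are below) =====
def Claim_equal_create_rules : Prop := ∀ (s : String), Dom_create_rules s → Spec_create_rules s (create_rules s)

-- ===== LEMMAS AND PROOFS =====

-- A's rules update is exactly Dict.modify with default []
lemma pvStepA_rules (d : PySem.Dict String (List String)) (sec : List String) (i : String)
    (hi : i ≠ "") :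
    pvStepA (true, d, sec) i
      = (true, d.modify (PySem.Str.slice i (some 0) (some 2)) []
            (· ++ [PySem.Str.slice i (some 3) (some 5)]), sec) := by
  by_cases h : d.contains (PySem.Str.slice i (some 0) (some 2)) = true
  · simp [pvStepA, hi, h]
  · have hc : d.contains (PySem.Str.slice i (some 0) (some 2)) = false := by simpa using h
    simp only [pvStepA, beq_iff_eq, hi, if_false, hc, Bool.false_eq_true, if_true]
    rw [PySem.Dict.modify, PySem.Dict.modify]
    simp [PySem.Dict.getD_of_not_contains, hc, PySem.Dict.insert_insert_self]

-- folding A over a list with no empty line keeps check = true and only builds the dict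
lemma pvFoldA_true (l : List String) (h : "" ∉ l) (d : PySem.Dict String (List String))
    (sec : List String) :
    l.foldl pvStepA (true, d, sec)
      = (true, l.foldl (fun d i => d.modify (PySem.Str.slice i (some 0) (some 2)) []
            (· ++ [PySem.Str.slice i (some 3) (some 5)])) d, sec) := by
  induction l generalizing d with
  | nil => rfl
  | cons i t ih =>
    simp only [List.mem_cons, not_or] at h
    simp only [List.foldl_cons, pvStepA_rules d sec i (fun he => h.1 he.symm)]
    exact ih h.2 _

-- folding A from check = false only appends to second_part
lemma pvFoldA_false (l : List String) (d : PySem.Dict String (List String)) (sec : List String) :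
    l.foldl pvStepA (false, d, sec) = (false, d, sec ++ l) := by
  induction l generalizing sec with
  | nil => simp only [List.foldl_nil, List.append_nil]
  | cons i t ih =>
    simp only [List.foldl_cons]
    have hst : pvStepA (false, d, sec) i = (false, d, sec ++ [i]) := rfl
    rw [hst, ih]
    simp

-- the dict built over a line list, as an items list, is B's grouped list
lemma pvDict_items (l : List String) :
    (l.foldl (fun d i => d.modify (PySem.Str.slice i (some 0) (some 2)) []
        (· ++ [PySem.Str.slice i (some 3) (some 5)])) PySem.Dict.empty).items
      = (PySem.List.dedup (l.map (fun i => PySem.Str.slice i (some 0) (some 2)))).map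
          (fun k => (k, (l.filter (fun i => PySem.Str.slice i (some 0) (some 2) == k)).map
              (fun i => PySem.Str.slice i (some 3) (some 5)))) := by
  have hnd : (l.foldl (fun d i => d.modify (PySem.Str.slice i (some 0) (some 2)) []
      (· ++ [PySem.Str.slice i (some 3) (some 5)])) PySem.Dict.empty).keys.Nodup := by
    exact PySem.Dict.nodup_keys_foldl_modify_key l _ [] _ _ (by simp [pysem])
  rw [PySem.Dict.items_eq_map_keys _ hnd [], PySem.Dict.keys_foldl_modify_key]
  have hkeys : PySem.Set.update (PySem.Dict.empty : PySem.Dict String (List String)).keys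
      (l.map fun i => PySem.Str.slice i (some 0) (some 2))
      = PySem.List.dedup (l.map fun i => PySem.Str.slice i (some 0) (some 2)) := rfl
  rw [hkeys]
  refine List.map_congr_left (fun k _ => ?_)
  have hg := PySem.Dict.getD_foldl_modify_append
      (l := l.map (fun i => (PySem.Str.slice i (some 0) (some 2),
                             PySem.Str.slice i (some 3) (some 5))))
      (d := (PySem.Dict.empty : PySem.Dict String (List String))) (c := k)
  rw [← List.foldl_map
      (f := fun i => (PySem.Str.slice i (some 0) (some 2), PySem.Str.slice i (some 3) (some 5)))
      (g := fun d p => PySem.Dict.modify d p.1 [] (· ++ [p.2])), hg,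
      List.filter_map, List.map_map]
  simp [Function.comp_def]

-- ===== VERDICT (by name: the statement is the Claim_ definition above) =====
theorem create_rules_spec : Claim_equal_create_rules := by
  intro s _
  simp only [Spec_create_rules, create_rules, create_rules_alt]
  cases h : PySem.List.index? (pvLines s) "" with
  | none =>
    have hmem : "" ∉ pvLines s := (PySem.List.index?_eq_none_iff _ _).mp h
    simp only [Option.getD_none]
    rw [pvFoldA_true _ hmem, pvDict_items]
    simp
  | some k =>
    obtain ⟨pre, suf, hsplit, hlen, hpre⟩ := (PySem.List.index?_eq_some_iff _ _ _).mp h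
    simp only [Option.getD_some]
    rw [hsplit, List.foldl_append, pvFoldA_true _ hpre, List.foldl_cons]
    have hstep : pvStepA (true, pre.foldl (fun d i =>
        d.modify (PySem.Str.slice i (some 0) (some 2)) []
          (· ++ [PySem.Str.slice i (some 3) (some 5)])) PySem.Dict.empty, []) ""
        = (false, pre.foldl (fun d i =>
        d.modify (PySem.Str.slice i (some 0) (some 2)) []
          (· ++ [PySem.Str.slice i (some 3) (some 5)])) PySem.Dict.empty, []) := rfl
    rw [hstep, pvFoldA_false, pvDict_items]
    have htake : (pre ++ "" :: suf).take k = pre := by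
      subst hlen; simp
    have hdrop : (pre ++ "" :: suf).drop (k + 1) = suf := by
      subst hlen
      have : pre ++ "" :: suf = (pre ++ [""]) ++ suf := by simp
      rw [this, show pre.length + 1 = (pre ++ [""]).length by simp, List.drop_left]
    simp [htake, hdrop]
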